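-- pv_equiv track=rewrite | github.com/pypi-data/pypi-mirror-370 | packages/anges/anges-0.1.1.tar.gz/anges-0.1.1/anges/cli_interface/cli_runner.py | convert_notes_to_expected_format
-- ===== SOURCE A (Python) =====
-- def convert_notes_to_expected_format(notes):
--     """Convert notes to the format expected by the agent.
--
--     Args:
--         notes (list): List of validated note dictionaries
--
--     Returns:
--         list: Notes in the expected format for the agent
--     """
--     # For now, we'll keep the same format but ensure consistency
--     # This can be enhanced later if the agent expects a different format
--     converted_notes = []
--
--     for note in notes:
--         converted_note = {
--             'scope': note['scope'].strip(),
--             'title': note['title'].strip(),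
--             'content': note['content'].strip()
--         }
--
--         # Preserve any additional fields that might be present
--         for key, value in note.items():
--             if key not in ['scope', 'title', 'content']:
--                 converted_note[key] = value
--
--         converted_notes.append(converted_note)
--
--     return converted_notes
-- ===== SOURCE B (Python) =====
-- def _convert_one(note):
--     """One partition pass over note.items(): core fields are routed (stripped) into
--     `core`, everything else into `extras`; the result is assembled from the partition,
--     never indexing into `note` itself."""
--     CORE = ("scope", "title", "content")
--     core = {}
--     extras = []
--     for key, value in note.items():
--         if key in CORE:
--             core[key] = value.strip()
--         else:
--             extras.append((key, value))
--     converted = {k: core[k] for k in CORE}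
--     converted.update(extras)
--     return converted
--
--
-- def convert_notes_to_expected_format(notes):
--     """Convert notes to the format expected by the agent (partition-pass rewrite)."""
--     return [_convert_one(note) for note in notes]
-- ===== Notes on version B (the rewrite author's own statement) =====
-- stated objective: alternative
-- what changed: Per note, A builds the result by three keyed lookups into the note dict followed by a filter loop over items(); B instead makes a single partition pass over items() that routes core fields (stripped) into a small dict and all other items into an extras list, then assembles the output from the partition without ever indexing into the note.
import Mathlib
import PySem

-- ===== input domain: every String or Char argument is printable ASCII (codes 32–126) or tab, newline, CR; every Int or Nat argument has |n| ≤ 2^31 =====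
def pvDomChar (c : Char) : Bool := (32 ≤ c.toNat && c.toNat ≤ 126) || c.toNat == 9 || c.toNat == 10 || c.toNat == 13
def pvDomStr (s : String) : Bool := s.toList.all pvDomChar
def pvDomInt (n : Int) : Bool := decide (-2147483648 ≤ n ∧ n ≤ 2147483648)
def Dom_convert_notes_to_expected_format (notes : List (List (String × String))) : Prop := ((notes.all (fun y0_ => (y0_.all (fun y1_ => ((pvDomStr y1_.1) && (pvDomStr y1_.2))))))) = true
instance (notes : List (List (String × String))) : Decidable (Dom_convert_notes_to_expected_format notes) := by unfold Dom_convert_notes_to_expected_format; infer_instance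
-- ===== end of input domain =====

-- B replaces A's three keyed lookups into the note plus a filter loop over items() by a single
-- partition pass routing core fields (stripped) into a small dict and extras into a list,
-- assembling the output from the partition; objective: alternative (same cost, no lookups).


-- ===== PORT A =====
-- one converted note: the literal dict of the three stripped core fields, then the
-- 'for key, value in note.items(): if key not in [...]: converted_note[key] = value' loop.
-- note[k] (KeyError when absent) is ported as Dict.getD _ k "" ; absence is excluded by Pre_.
def pvConvNoteA (note : List (String × String)) : List (String × String) :=
  let d : PySem.Dict String String := PySem.Dict.mk
    [("scope", PySem.Str.strip (PySem.Dict.getD (PySem.Dict.mk note) "scope" "")),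
     ("title", PySem.Str.strip (PySem.Dict.getD (PySem.Dict.mk note) "title" "")),
     ("content", PySem.Str.strip (PySem.Dict.getD (PySem.Dict.mk note) "content" ""))]
  let d := note.foldl (fun c p =>
    if p.1 ∈ (["scope", "title", "content"] : List String) then c
    else PySem.Dict.insert c p.1 p.2) d
  d.items

def convert_notes_to_expected_format (notes : List (List (String × String))) : List (List (String × String)) :=
  notes.foldl (fun acc note => acc ++ [pvConvNoteA note]) []

-- ===== PORT B =====
-- the partition pass of _convert_one: one fold over note.items() carrying (core, extras);
-- then the comprehension {k: core[k] for k in CORE} (core[k], KeyError when absent, ported as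
-- getD _ k ""; absence is excluded by Pre_) and converted.update(extras) as a fold of inserts.
def pvConvNoteB (note : List (String × String)) : List (String × String) :=
  let st := note.foldl
    (fun (st : PySem.Dict String String × List (String × String)) p =>
      if p.1 ∈ (["scope", "title", "content"] : List String)
      then (PySem.Dict.insert st.1 p.1 (PySem.Str.strip p.2), st.2)
      else (st.1, st.2 ++ [p]))
    (PySem.Dict.empty, [])
  let conv : PySem.Dict String String :=
    PySem.Dict.mk ((["scope", "title", "content"] : List String).map
      (fun k => (k, PySem.Dict.getD st.1 k "")))
  let conv := st.2.foldl (fun c p => PySem.Dict.insert c p.1 p.2) conv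
  conv.items

def convert_notes_to_expected_format_alt (notes : List (List (String × String))) : List (List (String × String)) :=
  notes.map pvConvNoteB

-- ===== PRECONDITION & SPEC =====
-- Pre_ excludes notes missing one of the core keys (there A — and B — raise KeyError) and
-- association lists with duplicate keys, which do not encode any Python dict input.
def Pre_convert_notes_to_expected_format (notes : List (List (String × String))) : Prop :=
  ∀ note ∈ notes,
    ("scope" ∈ note.map Prod.fst ∧ "title" ∈ note.map Prod.fst ∧ "content" ∈ note.map Prod.fst)
    ∧ (note.map Prod.fst).Nodup
instance (notes : List (List (String × String))) : Decidable (Pre_convert_notes_to_expected_format notes) := by unfold Pre_convert_notes_to_expected_format; infer_instance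

def pvWitness_convert_notes_to_expected_format : (List (List (String × String))) :=
  [[("scope", " a "), ("title", "t"), ("content", "c"), ("extra", " x ")]]

def Spec_convert_notes_to_expected_format (notes : List (List (String × String))) (out : List (List (String × String))) : Prop := out = convert_notes_to_expected_format_alt notes
instance (notes : List (List (String × String))) (out : List (List (String × String))) : Decidable (Spec_convert_notes_to_expected_format notes out) := by unfold Spec_convert_notes_to_expected_format; infer_instance

-- ===== CLAIM =====
def Claim_equal_convert_notes_to_expected_format : Prop := ∀ (notes : List (List (String × String))), Dom_convert_notes_to_expected_format notes → Pre_convert_notes_to_expected_format notes → Spec_convert_notes_to_expected_format notes (convert_notes_to_expected_format notes)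

-- ===== LEMMAS AND PROOFS =====

-- the canonical value both per-note computations reach
def pvCanon (note : List (String × String)) : List (String × String) :=
  [("scope", PySem.Str.strip (PySem.Dict.getD (PySem.Dict.mk note) "scope" "")),
   ("title", PySem.Str.strip (PySem.Dict.getD (PySem.Dict.mk note) "title" "")),
   ("content", PySem.Str.strip (PySem.Dict.getD (PySem.Dict.mk note) "content" ""))] ++
  note.filter (fun p => !(decide (p.1 ∈ (["scope", "title", "content"] : List String))))

-- ---- A side ----

-- A's inner loop over distinct keys, each fresh w.r.t. the accumulator, appends the filtered items.
lemma pvFoldl_insert_if (l : List (String × String)) :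
    ∀ (d : PySem.Dict String String),
    (l.map Prod.fst).Nodup →
    (∀ p ∈ l, p.1 ∉ (["scope", "title", "content"] : List String) → d.contains p.1 = false) →
    (l.foldl (fun c p =>
      if p.1 ∈ (["scope", "title", "content"] : List String) then c
      else PySem.Dict.insert c p.1 p.2) d).items
    = d.items ++ l.filter (fun p => !(decide (p.1 ∈ (["scope", "title", "content"] : List String)))) := by
  induction l with
  | nil => intro d _ _; simp
  | cons p t ih =>
    intro d hnd hfresh
    simp only [List.map_cons, List.nodup_cons] at hnd
    by_cases hc : p.1 ∈ (["scope", "title", "content"] : List String)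
    · simp only [List.foldl_cons, List.filter_cons, hc, decide_true, Bool.not_true,
        if_true, if_false, Bool.false_eq_true]
      exact ih d hnd.2 (fun q hq hq' => hfresh q (List.mem_cons_of_mem _ hq) hq')
    · have hdc : d.contains p.1 = false := hfresh p (List.mem_cons_self ..) hc
      simp only [List.foldl_cons, List.filter_cons, hc, decide_false, Bool.not_false,
        if_true, if_false]
      have hfresh' : ∀ q ∈ t, q.1 ∉ (["scope", "title", "content"] : List String) →
          (PySem.Dict.insert d p.1 p.2).contains q.1 = false := by
        intro q hq hq'
        rw [PySem.Dict.contains_insert]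
        have hne : q.1 ≠ p.1 := by
          intro h; exact hnd.1 (h ▸ List.mem_map_of_mem hq)
        simp [hne, hfresh q (List.mem_cons_of_mem _ hq) hq']
      rw [ih (PySem.Dict.insert d p.1 p.2) hnd.2 hfresh',
          PySem.Dict.items_insert_of_not_contains _ _ hdc]
      simp

lemma pvConvNoteA_eq (note : List (String × String))
    (hnd : (note.map Prod.fst).Nodup) : pvConvNoteA note = pvCanon note := by
  unfold pvConvNoteA pvCanon
  have hfresh : ∀ p ∈ note, p.1 ∉ (["scope", "title", "content"] : List String) →
      (PySem.Dict.mk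
        [("scope", PySem.Str.strip (PySem.Dict.getD (PySem.Dict.mk note) "scope" "")),
         ("title", PySem.Str.strip (PySem.Dict.getD (PySem.Dict.mk note) "title" "")),
         ("content", PySem.Str.strip (PySem.Dict.getD (PySem.Dict.mk note) "content" ""))]).contains p.1 = false := by
    intro p hp hp'
    simp only [List.mem_cons, List.not_mem_nil, or_false, not_or] at hp'
    simp
    exact ⟨Ne.symm hp'.1, Ne.symm hp'.2.1, Ne.symm hp'.2.2⟩
  rw [pvFoldl_insert_if note _ hnd hfresh]

-- ---- B side ----

-- B's partition fold splits into the core-only dict fold and the appended extras.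
lemma pvPartition (l : List (String × String)) :
    ∀ (d : PySem.Dict String String) (acc : List (String × String)),
    l.foldl
      (fun (st : PySem.Dict String String × List (String × String)) p =>
        if p.1 ∈ (["scope", "title", "content"] : List String)
        then (PySem.Dict.insert st.1 p.1 (PySem.Str.strip p.2), st.2)
        else (st.1, st.2 ++ [p])) (d, acc)
    = (l.foldl (fun c p =>
        if p.1 ∈ (["scope", "title", "content"] : List String)
        then PySem.Dict.insert c p.1 (PySem.Str.strip p.2) else c) d,
       acc ++ l.filter (fun p => !(decide (p.1 ∈ (["scope", "title", "content"] : List String))))) := by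
  induction l with
  | nil => intro d acc; simp
  | cons p t ih =>
    intro d acc
    by_cases hc : p.1 ∈ (["scope", "title", "content"] : List String)
    · simp only [List.foldl_cons, List.filter_cons, hc, decide_true, Bool.not_true,
        if_true, if_false, Bool.false_eq_true]
      exact ih _ acc
    · simp only [List.foldl_cons, List.filter_cons, hc, decide_false, Bool.not_false,
        if_true, if_false]
      rw [ih d (acc ++ [p])]
      simp

-- the core fold never touches a key absent from l
lemma pvCoreFold_get?_of_not_mem (l : List (String × String)) (k : String)
    (hk : k ∉ l.map Prod.fst) :
    ∀ (d : PySem.Dict String String),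
    (l.foldl (fun c p =>
      if p.1 ∈ (["scope", "title", "content"] : List String)
      then PySem.Dict.insert c p.1 (PySem.Str.strip p.2) else c) d).get? k = d.get? k := by
  induction l with
  | nil => intro d; rfl
  | cons p t ih =>
    simp only [List.map_cons, List.mem_cons, not_or] at hk
    intro d
    by_cases hc : p.1 ∈ (["scope", "title", "content"] : List String)
    · simp only [List.foldl_cons, if_pos hc]
      rw [ih hk.2, PySem.Dict.get?_insert_of_ne _ _ hk.1]
    · simp only [List.foldl_cons, if_neg hc]
      exact ih hk.2 d

-- on a core key of a nodup list, the core fold holds the stripped first binding of l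
lemma pvCoreFold_get? (k : String) (hk : k ∈ (["scope", "title", "content"] : List String))
    (l : List (String × String)) (hnd : (l.map Prod.fst).Nodup) :
    ∀ (d : PySem.Dict String String),
    (l.foldl (fun c p =>
      if p.1 ∈ (["scope", "title", "content"] : List String)
      then PySem.Dict.insert c p.1 (PySem.Str.strip p.2) else c) d).get? k
    = (((PySem.Dict.mk l).get? k).map PySem.Str.strip).or (d.get? k) := by
  induction l with
  | nil => intro d; simp [PySem.Dict.get?]
  | cons p t ih =>
    intro d
    simp only [List.map_cons, List.nodup_cons] at hnd
    by_cases hpk : p.1 = k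
    · subst hpk
      simp only [List.foldl_cons, if_pos hk]
      rw [pvCoreFold_get?_of_not_mem t p.1 hnd.1, PySem.Dict.get?_insert_self,
        PySem.Dict.get?_mk_cons]
      simp
    · have hbk : (p.1 == k) = false := by simp [hpk]
      simp only [List.foldl_cons]
      rw [PySem.Dict.get?_mk_cons]
      simp only [hbk, Bool.false_eq_true, if_false]
      by_cases hc : p.1 ∈ (["scope", "title", "content"] : List String)
      · simp only [if_pos hc]
        rw [ih hnd.2, PySem.Dict.get?_insert_of_ne _ _ (Ne.symm hpk)]
      · simp only [if_neg hc]
        exact ih hnd.2 d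

lemma pvCoreFold_getD (k : String) (hk : k ∈ (["scope", "title", "content"] : List String))
    (l : List (String × String)) (hnd : (l.map Prod.fst).Nodup) :
    (l.foldl (fun c p =>
      if p.1 ∈ (["scope", "title", "content"] : List String)
      then PySem.Dict.insert c p.1 (PySem.Str.strip p.2) else c) PySem.Dict.empty).getD k ""
    = PySem.Str.strip (PySem.Dict.getD (PySem.Dict.mk l) k "") := by
  rw [PySem.Dict.getD_eq_get?_getD, PySem.Dict.getD_eq_get?_getD,
      pvCoreFold_get? k hk l hnd]
  cases h : (PySem.Dict.mk l).get? k with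
  | none => simp [PySem.Dict.get?_empty]; decide
  | some v => simp

lemma pvConvNoteB_eq (note : List (String × String))
    (hnd : (note.map Prod.fst).Nodup) : pvConvNoteB note = pvCanon note := by
  unfold pvConvNoteB pvCanon
  rw [pvPartition note PySem.Dict.empty []]
  simp only [List.nil_append]
  set extras := note.filter
    (fun p => !(decide (p.1 ∈ (["scope", "title", "content"] : List String)))) with hex
  have hndex : (extras.map Prod.fst).Nodup :=
    hnd.sublist (List.Sublist.map Prod.fst List.filter_sublist)
  have hcore : ∀ k, k ∈ (["scope", "title", "content"] : List String) →
      (note.foldl (fun c p =>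
        if p.1 ∈ (["scope", "title", "content"] : List String)
        then PySem.Dict.insert c p.1 (PySem.Str.strip p.2) else c) PySem.Dict.empty).getD k ""
      = PySem.Str.strip (PySem.Dict.getD (PySem.Dict.mk note) k "") :=
    fun k hk => pvCoreFold_getD k hk note hnd
  simp only [List.map_cons, List.map_nil]
  rw [hcore "scope" (by decide), hcore "title" (by decide), hcore "content" (by decide)]
  rw [PySem.Dict.items_foldl_insert_fresh (k := Prod.fst) (v := Prod.snd)]
  · simp
  · intro p hp
    have hp' : p.1 ∉ (["scope", "title", "content"] : List String) := by
      have := List.of_mem_filter hp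
      simpa using this
    simp only [List.mem_cons, List.not_mem_nil, or_false, not_or] at hp'
    simp
    exact ⟨Ne.symm hp'.1, Ne.symm hp'.2.1, Ne.symm hp'.2.2⟩
  · exact hndex

-- ===== VERDICT =====
theorem convert_notes_to_expected_format_spec : Claim_equal_convert_notes_to_expected_format := by
  intro notes _ hpre
  unfold Spec_convert_notes_to_expected_format convert_notes_to_expected_format
    convert_notes_to_expected_format_alt
  rw [PySem.List.foldl_append_singleton_eq_map]
  exact List.map_congr_left (fun note hnote =>
    (pvConvNoteA_eq note (hpre note hnote).2).trans (pvConvNoteB_eq note (hpre note hnote).2).symm)
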